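-- pv_equiv track=rewrite | github.com/pmixer/paper.miner | backend/search.py | get_authors
-- ===== SOURCE A (Python) =====
-- AUTHOR_TAG = '<a href="/search/?searchtype=author'
--
-- def get_authors(lines, i):
--     authors = []
--     while True:
--         if not lines[i].startswith(AUTHOR_TAG):
--             break
--         idx = lines[i].find('>')
--         if lines[i].endswith(','):
--             authors.append(lines[i][idx + 1: -5])
--         else:
--             authors.append(lines[i][idx + 1: -4])
--         i += 1
--     return authors, i
-- ===== SOURCE B (Python) =====
-- AUTHOR_TAG = '<a href="/search/?searchtype=author'
--
--
-- def get_authors(lines, i):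
--     # Pass 1: find the end of the author block.
--     j = i
--     while lines[j].startswith(AUTHOR_TAG):
--         j += 1
--     # Pass 2: parse each line of the block in one comprehension.
--     authors = [lines[k][lines[k].find('>') + 1: -5 if lines[k].endswith(',') else -4]
--                for k in range(i, j)]
--     return authors, j
-- ===== Notes on version B (the rewrite author's own statement) =====
-- stated objective: alternative
-- what changed: A's single interleaved scan-and-append while-True loop is replaced by two separate passes: a boundary scan that only advances an index, then a comprehension over range(i, j) that parses each line of the block.
import Mathlib
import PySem

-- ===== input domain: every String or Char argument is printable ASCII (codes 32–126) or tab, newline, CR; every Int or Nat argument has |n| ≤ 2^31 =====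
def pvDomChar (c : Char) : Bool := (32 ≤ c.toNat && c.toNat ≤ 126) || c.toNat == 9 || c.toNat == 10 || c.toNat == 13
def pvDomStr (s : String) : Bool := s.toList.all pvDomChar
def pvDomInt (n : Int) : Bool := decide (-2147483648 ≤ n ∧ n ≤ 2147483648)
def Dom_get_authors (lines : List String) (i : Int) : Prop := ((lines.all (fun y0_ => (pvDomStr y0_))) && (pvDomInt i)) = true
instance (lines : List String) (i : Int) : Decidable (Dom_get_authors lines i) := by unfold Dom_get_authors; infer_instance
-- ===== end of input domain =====

-- B replaces A's interleaved scan-and-append while-True loop by two passes (boundary scan, then a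
-- comprehension parsing the block); same return value wherever A returns (proved below).

def pvTag : String := "<a href=\"/search/?searchtype=author"

-- ===== PORT A =====
-- A's 'while True' loop; fuel bounds iterations (i strictly increases, pyGet? fails past the end,
-- so 2*len+1 fuel is never exhausted). The 'none' / fuel-0 branches are where Python raises
-- IndexError — excluded by Pre_.
def pvGoA (lines : List String) : Nat → List String → Int → List String × Int
  | 0, acc, i => (acc, i)
  | f+1, acc, i =>
    match PySem.List.pyGet? lines i with
    | none => (acc, i)   -- lines[i] raises IndexError (outside Pre_)
    | some s =>
      if ¬ (PySem.Str.startswith s pvTag) then (acc, i)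
      else
        let idx := PySem.Str.find s ">"
        let piece := if PySem.Str.endswith s "," then PySem.Str.slice s (some (idx + 1)) (some (-5))
                     else PySem.Str.slice s (some (idx + 1)) (some (-4))
        pvGoA lines f (acc ++ [piece]) (i + 1)

def get_authors (lines : List String) (i : Int) : List String × Int :=
  pvGoA lines (2 * lines.length + 1) [] i

-- ===== PORT B =====
-- pass 1: boundary scan (only advances j)
def pvGoB (lines : List String) : Nat → Int → Int
  | 0, j => j
  | f+1, j =>
    match PySem.List.pyGet? lines j with
    | none => j   -- lines[j] raises IndexError (outside Pre_)
    | some s => if PySem.Str.startswith s pvTag then pvGoB lines f (j + 1) else j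

-- pass 2: the comprehension body (k is in range when Pre_ holds, so the getD default is unused)
def pvParseB (lines : List String) (k : Int) : String :=
  let s := PySem.List.pyGetD lines k ""
  PySem.Str.slice s (some (PySem.Str.find s ">" + 1))
    (some (if PySem.Str.endswith s "," then -5 else -4))

def get_authors_alt (lines : List String) (i : Int) : List String × Int :=
  let j := pvGoB lines (2 * lines.length + 1) i
  ((PySem.List.pyRange i j 1).map (pvParseB lines), j)

-- ===== PRECONDITION & SPEC =====
-- Pre_ holds exactly where Python's A returns normally: lines[i] is a valid index and some line of
-- lines[i:] does not start with the author tag (otherwise the scan runs off the end: IndexError).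
def Pre_get_authors (lines : List String) (i : Int) : Prop :=
  PySem.Raise.InRange lines.length i ∧
  ∃ k ∈ PySem.List.pyRange i lines.length 1,
    ¬ (PySem.Str.startswith (PySem.List.pyGetD lines k "") pvTag = true)
instance (lines : List String) (i : Int) : Decidable (Pre_get_authors lines i) := by
  unfold Pre_get_authors; infer_instance
def pvWitness_get_authors : List String × Int := (["x"], 0)

def Spec_get_authors (lines : List String) (i : Int) (out : List String × Int) : Prop := out = get_authors_alt lines i
instance (lines : List String) (i : Int) (out : List String × Int) : Decidable (Spec_get_authors lines i out) := by unfold Spec_get_authors; infer_instance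

-- ===== CLAIM (what is proved, stated in full; the proofs are below) =====
def Claim_equal_get_authors : Prop := ∀ (lines : List String) (i : Int), Dom_get_authors lines i → Pre_get_authors lines i → Spec_get_authors lines i (get_authors lines i)

-- ===== LEMMAS AND PROOFS =====

theorem pvGoB_ge (lines : List String) : ∀ (f : Nat) (j : Int), j ≤ pvGoB lines f j := by
  intro f
  induction f with
  | zero => intro j; simp [pvGoB]
  | succ f ih =>
    intro j
    simp only [pvGoB]
    cases h : PySem.List.pyGet? lines j with
    | none => simp
    | some s =>
      dsimp only
      by_cases hs : PySem.Str.startswith s pvTag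
      · rw [if_pos hs]
        have := ih (j + 1); omega
      · rw [if_neg hs]

theorem pvGoA_eq (lines : List String) :
    ∀ (f : Nat) (acc : List String) (i : Int),
      pvGoA lines f acc i =
        (acc ++ (PySem.List.pyRange i (pvGoB lines f i) 1).map (pvParseB lines),
         pvGoB lines f i) := by
  intro f
  induction f with
  | zero =>
    intro acc i
    simp [pvGoA, pvGoB, PySem.List.pyRange_one_eq_nil (le_refl i)]
  | succ f ih =>
    intro acc i
    simp only [pvGoA, pvGoB]
    cases h : PySem.List.pyGet? lines i with
    | none => simp [PySem.List.pyRange_one_eq_nil (le_refl i)]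
    | some s =>
      dsimp only
      by_cases hs : PySem.Str.startswith s pvTag
      · rw [if_neg (not_not_intro hs), if_pos hs, ih]
        have hlt : i < pvGoB lines f (i + 1) := by
          have := pvGoB_ge lines f (i + 1); omega
        rw [PySem.List.pyRange_one_cons hlt]
        have hd : PySem.List.pyGetD lines i "" = s := by
          simp [PySem.List.pyGetD, h]
        have hp : pvParseB lines i =
            (if PySem.Str.endswith s "," then
               PySem.Str.slice s (some (PySem.Str.find s ">" + 1)) (some (-5))
             else PySem.Str.slice s (some (PySem.Str.find s ">" + 1)) (some (-4))) := by
          simp only [pvParseB]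
          rw [hd]
          by_cases he : PySem.Str.endswith s ","
          · rw [if_pos he, if_pos he]
          · rw [if_neg he, if_neg he]
        simp [hp]
      · rw [if_pos hs, if_neg hs]
        simp [PySem.List.pyRange_one_eq_nil (le_refl i)]

-- ===== VERDICT (by name: the statement is the Claim_ definition above) =====
theorem get_authors_spec : Claim_equal_get_authors := by
  intro lines i _ _
  unfold Spec_get_authors get_authors get_authors_alt
  simpa using pvGoA_eq lines (2 * lines.length + 1) [] i
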